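-- pv_equiv track=rewrite | github.com/Tommyhuy1705/Explainable_Signed_Link_Prediction_for_Reddit_Inter-Community_Conflict_Warning | src/phase3.py | _build_feature_sets
-- ===== SOURCE A (Python) =====
-- TEXT_FEATURE_PREFIX = "text_property_"
--
-- PAIR_HISTORY_FEATURES = {
--     "interaction_count",
--     "positive_count",
--     "negative_count",
--     "sentiment_balance",
--     "negative_ratio",
--     "reciprocal_edge",
-- }
--
-- BALANCE_FEATURES = {
--     "common_neighbors",
--     "balance_+++",
--     "balance_++-",
--     "balance_+--",
--     "balance_---",
-- }
--
-- def _is_text_feature(column: str) -> bool: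
--     """Identify features derived from the 86 SNAP text-property vector."""
--     return (
--         column.startswith(TEXT_FEATURE_PREFIX)
--         or column == "text_feature_count"
--         or column.startswith("link_location_")
--     )
--
-- def _is_balance_feature(column: str) -> bool:
--     """Identify local structural-balance features."""
--     return column in BALANCE_FEATURES or column.startswith("balance_")
--
-- def _build_feature_sets(feature_columns: list[str]) -> dict[str, list[str]]:
--     """Create ablation feature sets for paper-style model comparison."""
--     text_columns = [column for column in feature_columns if _is_text_feature(column)]
--     graph_columns = [column for column in feature_columns if column not in text_columns]
--     feature_sets = {"hybrid": feature_columns}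
--     if graph_columns:
--         feature_sets["graph_only"] = graph_columns
--     if text_columns:
--         feature_sets["text_only"] = text_columns
--     no_balance_columns = [column for column in feature_columns if not _is_balance_feature(column)]
--     if len(no_balance_columns) < len(feature_columns):
--         feature_sets["hybrid_no_balance"] = no_balance_columns
--     graph_no_balance_columns = [column for column in graph_columns if not _is_balance_feature(column)]
--     if graph_columns and len(graph_no_balance_columns) < len(graph_columns):
--         feature_sets["graph_no_balance"] = graph_no_balance_columns
--     history_columns = [column for column in feature_columns if column in PAIR_HISTORY_FEATURES]
--     if history_columns:
--         feature_sets["history_only"] = history_columns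
--     return feature_sets
-- ===== SOURCE B (Python) =====
-- PAIR_HISTORY_FEATURES = {
--     "interaction_count",
--     "positive_count",
--     "negative_count",
--     "sentiment_balance",
--     "negative_ratio",
--     "reciprocal_edge",
-- }
--
-- BALANCE_FEATURES = {
--     "common_neighbors",
--     "balance_+++",
--     "balance_++-",
--     "balance_+--",
--     "balance_---",
-- }
--
--
-- def _build_feature_sets(feature_columns: list[str]) -> dict[str, list[str]]:
--     """One pass over feature_columns maintaining five accumulators."""
--     text, graph, no_balance, graph_no_balance, history = [], [], [], [], []
--     for column in feature_columns:
--         is_text = (column.startswith("text_property_")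
--                    or column == "text_feature_count"
--                    or column.startswith("link_location_"))
--         is_balance = column in BALANCE_FEATURES or column.startswith("balance_")
--         (text if is_text else graph).append(column)
--         if not is_balance:
--             no_balance.append(column)
--             if not is_text:
--                 graph_no_balance.append(column)
--         if column in PAIR_HISTORY_FEATURES:
--             history.append(column)
--     feature_sets = {"hybrid": feature_columns}
--     if graph:
--         feature_sets["graph_only"] = graph
--     if text:
--         feature_sets["text_only"] = text
--     if len(no_balance) < len(feature_columns):
--         feature_sets["hybrid_no_balance"] = no_balance
--     if graph and len(graph_no_balance) < len(graph):
--         feature_sets["graph_no_balance"] = graph_no_balance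
--     if history:
--         feature_sets["history_only"] = history
--     return feature_sets
-- ===== Notes on version B (the rewrite author's own statement) =====
-- stated objective: alternative
-- what changed: Replaces A's six separate list-comprehension passes (including a quadratic 'column not in text_columns' scan) with a single loop over feature_columns that classifies each column once and maintains five accumulator lists.
import Mathlib
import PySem

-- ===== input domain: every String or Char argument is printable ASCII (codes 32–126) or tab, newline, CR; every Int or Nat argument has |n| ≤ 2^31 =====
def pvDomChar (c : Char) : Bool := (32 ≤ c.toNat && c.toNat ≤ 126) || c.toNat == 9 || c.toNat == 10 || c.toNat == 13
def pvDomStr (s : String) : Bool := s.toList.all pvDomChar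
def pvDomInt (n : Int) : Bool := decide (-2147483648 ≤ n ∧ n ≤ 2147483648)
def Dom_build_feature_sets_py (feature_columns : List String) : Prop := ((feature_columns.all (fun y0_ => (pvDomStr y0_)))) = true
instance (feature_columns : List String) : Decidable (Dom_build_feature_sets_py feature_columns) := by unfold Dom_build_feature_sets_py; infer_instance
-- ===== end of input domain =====

-- B replaces A's six filtering passes by one loop over feature_columns keeping five accumulators; same return value.


-- ===== PORT A =====
def pvTextFeaturePrefix : String := "text_property_"

def pvPairHistoryFeatures : List String :=
  ["interaction_count", "positive_count", "negative_count",
   "sentiment_balance", "negative_ratio", "reciprocal_edge"]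

def pvBalanceFeatures : List String :=
  ["common_neighbors", "balance_+++", "balance_++-", "balance_+--", "balance_---"]

def pvIsTextFeature (column : String) : Bool :=
  PySem.Str.startswith column pvTextFeaturePrefix
    || column == "text_feature_count"
    || PySem.Str.startswith column "link_location_"

def pvIsBalanceFeature (column : String) : Bool :=
  pvBalanceFeatures.contains column || PySem.Str.startswith column "balance_"

-- dict with fresh string-literal keys in insertion order = assoc list built by conditional appends (exact here: no key is ever inserted twice)
def build_feature_sets_py (feature_columns : List String) : List (String × List String) :=
  let text_columns := feature_columns.filter (fun column => pvIsTextFeature column)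
  let graph_columns := feature_columns.filter (fun column => !(text_columns.contains column))
  let feature_sets := [("hybrid", feature_columns)]
  let feature_sets := if !graph_columns.isEmpty then feature_sets ++ [("graph_only", graph_columns)] else feature_sets
  let feature_sets := if !text_columns.isEmpty then feature_sets ++ [("text_only", text_columns)] else feature_sets
  let no_balance_columns := feature_columns.filter (fun column => !pvIsBalanceFeature column)
  let feature_sets := if no_balance_columns.length < feature_columns.length then feature_sets ++ [("hybrid_no_balance", no_balance_columns)] else feature_sets
  let graph_no_balance_columns := graph_columns.filter (fun column => !pvIsBalanceFeature column)
  let feature_sets := if !graph_columns.isEmpty && graph_no_balance_columns.length < graph_columns.length then feature_sets ++ [("graph_no_balance", graph_no_balance_columns)] else feature_sets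
  let history_columns := feature_columns.filter (fun column => pvPairHistoryFeatures.contains column)
  let feature_sets := if !history_columns.isEmpty then feature_sets ++ [("history_only", history_columns)] else feature_sets
  feature_sets

-- ===== PORT B =====
def pvPairHistoryFeaturesAlt : List String :=
  ["interaction_count", "positive_count", "negative_count",
   "sentiment_balance", "negative_ratio", "reciprocal_edge"]

def pvBalanceFeaturesAlt : List String :=
  ["common_neighbors", "balance_+++", "balance_++-", "balance_+--", "balance_---"]

-- one loop iteration of Source B: classify the column once and extend the five accumulators
def pvAltStep (st : List String × List String × List String × List String × List String)
    (column : String) : List String × List String × List String × List String × List String :=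
  let (text, graph, no_balance, graph_no_balance, history) := st
  let is_text := PySem.Str.startswith column "text_property_"
      || column == "text_feature_count"
      || PySem.Str.startswith column "link_location_"
  let is_balance := pvBalanceFeaturesAlt.contains column || PySem.Str.startswith column "balance_"
  ((if is_text then text ++ [column] else text),
   (if is_text then graph else graph ++ [column]),
   (if !is_balance then no_balance ++ [column] else no_balance),
   (if !is_balance && !is_text then graph_no_balance ++ [column] else graph_no_balance),
   (if pvPairHistoryFeaturesAlt.contains column then history ++ [column] else history))

def build_feature_sets_py_alt (feature_columns : List String) : List (String × List String) :=
  let (text, graph, no_balance, graph_no_balance, history) :=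
    feature_columns.foldl pvAltStep ([], [], [], [], [])
  let feature_sets := [("hybrid", feature_columns)]
  let feature_sets := if !graph.isEmpty then feature_sets ++ [("graph_only", graph)] else feature_sets
  let feature_sets := if !text.isEmpty then feature_sets ++ [("text_only", text)] else feature_sets
  let feature_sets := if no_balance.length < feature_columns.length then feature_sets ++ [("hybrid_no_balance", no_balance)] else feature_sets
  let feature_sets := if !graph.isEmpty && graph_no_balance.length < graph.length then feature_sets ++ [("graph_no_balance", graph_no_balance)] else feature_sets
  let feature_sets := if !history.isEmpty then feature_sets ++ [("history_only", history)] else feature_sets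
  feature_sets

-- ===== PRECONDITION & SPEC =====
def Spec_build_feature_sets_py (feature_columns : List String) (out : List (String × List String)) : Prop := out = build_feature_sets_py_alt feature_columns
instance (feature_columns : List String) (out : List (String × List String)) : Decidable (Spec_build_feature_sets_py feature_columns out) := by unfold Spec_build_feature_sets_py; infer_instance

-- ===== CLAIM (what is proved, stated in full; the proofs are below) =====
def Claim_equal_build_feature_sets_py : Prop := ∀ (feature_columns : List String), Dom_build_feature_sets_py feature_columns → Spec_build_feature_sets_py feature_columns (build_feature_sets_py feature_columns)

-- ===== LEMMAS AND PROOFS =====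

-- the step's inline conditions, named (definitional)
lemma pvAltStep_def (t g n gn h : List String) (c : String) :
    pvAltStep (t, g, n, gn, h) c =
      (if pvIsTextFeature c then t ++ [c] else t,
       if pvIsTextFeature c then g else g ++ [c],
       if !pvIsBalanceFeature c then n ++ [c] else n,
       if !pvIsBalanceFeature c && !pvIsTextFeature c then gn ++ [c] else gn,
       if pvPairHistoryFeatures.contains c then h ++ [c] else h) := rfl

-- characterisation of B's single fold: each accumulator collects the matching filter
lemma pvAltStep_foldl (l : List String) (t g n gn h : List String) :
    l.foldl pvAltStep (t, g, n, gn, h) =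
      (t ++ l.filter (fun c => pvIsTextFeature c),
       g ++ l.filter (fun c => !pvIsTextFeature c),
       n ++ l.filter (fun c => !pvIsBalanceFeature c),
       gn ++ l.filter (fun c => !pvIsBalanceFeature c && !pvIsTextFeature c),
       h ++ l.filter (fun c => pvPairHistoryFeatures.contains c)) := by
  induction l generalizing t g n gn h with
  | nil => simp
  | cons x xs ih =>
    rw [List.foldl_cons, pvAltStep_def, ih]
    simp only [List.filter_cons]
    by_cases h1 : pvIsTextFeature x <;> by_cases h2 : pvIsBalanceFeature x <;>
      by_cases h3 : x ∈ pvPairHistoryFeatures <;>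
        simp [h1, h2, h3, List.append_assoc]

-- A's 'column not in text_columns' pass is the complement filter
lemma pv_graph_filter (l : List String) :
    l.filter (fun c => !((l.filter (fun column => pvIsTextFeature column)).contains c)) =
      l.filter (fun c => !pvIsTextFeature c) := by
  apply List.filter_congr
  intro x hx
  simp [List.mem_filter, hx]

-- A's two nested passes (filter graph, then filter non-balance) are B's single conjunctive filter
lemma pv_gnb_filter (l : List String) :
    (l.filter (fun c => !pvIsTextFeature c)).filter (fun c => !pvIsBalanceFeature c) =
      l.filter (fun c => !pvIsBalanceFeature c && !pvIsTextFeature c) := by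
  rw [List.filter_filter]

-- ===== VERDICT (by name: the statement is the Claim_ definition above) =====
theorem build_feature_sets_py_spec : Claim_equal_build_feature_sets_py := by
  intro l _
  show build_feature_sets_py l = build_feature_sets_py_alt l
  simp only [build_feature_sets_py, build_feature_sets_py_alt, pvAltStep_foldl,
    List.nil_append, pv_graph_filter, pv_gnb_filter]
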